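-- pv_equiv track=rewrite | github.com/shinkeonkim/boj-solution-archiving-site | data/source/16198_73629564.py | f
-- ===== SOURCE A (Python) =====
-- def f(n, l, crt):
--   if n == 2:
--     return crt
--
--   if n == 3:
--     return crt + l[0] * l[2]
--
--   mx = 0
--   for i in range(1, n - 1):
--     l2 = l[:i] + l[i+1:]
--     k = f(n - 1, l2, crt + l[i - 1] * l[i + 1])
--
--     mx = max(mx, k)
--
--   return mx
-- ===== SOURCE B (Python) =====
-- # Memoized top-down DP over remaining-beads states (tuples): separates the
-- # accumulator crt and A's floor-at-0 (mx starts at 0) into a single final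
-- # max(0, crt + gain), and caches each remaining-beads tuple once.
-- def f(n, l, crt):
--     if n == 2:
--         return crt
--     if n == 3:
--         return crt + l[0] * l[2]
--     if n < 2:
--         return 0
--     memo = {}
--     def gain(b):
--         got = memo.get(b)
--         if got is not None:
--             return got
--         if len(b) == 3:
--             v = b[0] * b[2]
--         else:
--             v = max(b[j - 1] * b[j + 1] + gain(b[:j] + b[j + 1:])
--                     for j in range(1, len(b) - 1))
--         memo[b] = v
--         return v
--     return max(0, crt + gain(tuple(l[:n])))
-- ===== Notes on version B (the rewrite author's own statement) =====
-- stated objective: alternative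
-- what changed: Replaces A's plain recursion over explicit sublists (re-threading crt and clamping at every level) with a memoized top-down DP keyed by the tuple of remaining beads, hoisting the accumulator and A's floor-at-0 into one final max(0, crt + gain).
import Mathlib
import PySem

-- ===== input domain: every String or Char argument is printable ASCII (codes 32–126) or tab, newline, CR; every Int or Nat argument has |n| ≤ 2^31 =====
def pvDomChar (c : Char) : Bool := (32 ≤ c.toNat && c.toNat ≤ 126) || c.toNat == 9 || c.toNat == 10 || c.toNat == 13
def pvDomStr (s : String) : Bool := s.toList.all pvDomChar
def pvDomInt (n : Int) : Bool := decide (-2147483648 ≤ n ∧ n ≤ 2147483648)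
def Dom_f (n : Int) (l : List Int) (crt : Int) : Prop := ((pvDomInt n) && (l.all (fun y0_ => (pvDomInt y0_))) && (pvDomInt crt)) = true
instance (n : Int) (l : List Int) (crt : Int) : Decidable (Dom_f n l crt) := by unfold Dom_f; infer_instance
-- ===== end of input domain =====

-- B replaces A's plain recursion over explicit sublists with a memoized DP keyed by the
-- tuple of remaining beads (accumulator crt and A's floor-at-0 hoisted into one final
-- max); equivalence is proved on Pre_f (A raises IndexError outside it).

-- ===== PORT A =====
-- A recurses with n-1 while n ≥ 4; phrased on n.toNat (for every n ≤ 1 Python's loop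
-- range(1, n-1) is empty and A returns mx = 0, as does fA on 0). Indexing is pyGetD:
-- inside Pre_f every index Python touches is in range, so this matches Python exactly.
def fA : Nat → List Int → Int → Int
  | 0, _, _ => 0
  | 1, _, _ => 0
  | 2, _, crt => crt
  | 3, l, crt => crt + PySem.List.pyGetD l 0 0 * PySem.List.pyGetD l 2 0
  | (m+4), l, crt =>
      (PySem.List.pyRange 1 ((m : Int) + 4 - 1) 1).foldl
        (fun mx i =>
          let l2 := PySem.List.slice l none (some i) ++ PySem.List.slice l (some (i+1)) none
          let k := fA (m+3) l2
                      (crt + PySem.List.pyGetD l (i-1) 0 * PySem.List.pyGetD l (i+1) 0)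
          max mx k) 0
  termination_by fu => fu

def f (n : Int) (l : List Int) (crt : Int) : Int := fA n.toNat l crt

-- ===== PORT B =====
-- gain(b) with memo threaded through (Python mutates the dict); fuel = len(b), which
-- strictly decreases with each recursive call (the 0 case is an unreachable guard).
def gainB : Nat → List Int → PySem.Dict (List Int) Int → Int × PySem.Dict (List Int) Int
  | 0, _, memo => (0, memo)
  | (fu+1), b, memo =>
    match PySem.Dict.get? memo b with
    | some v => (v, memo)
    | none =>
      if b.length = 3 then
        let v := PySem.List.pyGetD b 0 0 * PySem.List.pyGetD b 2 0
        (v, PySem.Dict.insert memo b v)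
      else
        let r := (PySem.List.pyRange 1 ((b.length : Int) - 1) 1).foldl
          (fun (acc : List Int × PySem.Dict (List Int) Int) j =>
            let b2 := PySem.List.slice b none (some j) ++ PySem.List.slice b (some (j+1)) none
            let p := gainB fu b2 acc.2
            (acc.1 ++ [PySem.List.pyGetD b (j-1) 0 * PySem.List.pyGetD b (j+1) 0 + p.1], p.2))
          ([], memo)
        let v := (PySem.List.max? r.1 (fun y => y)).getD 0
        (v, PySem.Dict.insert r.2 b v)
  termination_by fu => fu

def f_alt (n : Int) (l : List Int) (crt : Int) : Int :=
  if n = 2 then crt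
  else if n = 3 then crt + PySem.List.pyGetD l 0 0 * PySem.List.pyGetD l 2 0
  else if n < 2 then 0
  else max 0 (crt + (gainB n.toNat (PySem.List.slice l none (some n)) PySem.Dict.empty).1)

-- ===== PRECONDITION & SPEC =====
-- Exactly the inputs on which A returns: for n ≥ 3 A eventually evaluates an index ≥ n-1,
-- so it raises IndexError unless n ≤ len(l); for n ≤ 2 it returns (crt or 0) for any l.
def Pre_f (n : Int) (l : List Int) (crt : Int) : Prop := n ≤ 2 ∨ (3 ≤ n ∧ n ≤ l.length)
instance (n : Int) (l : List Int) (crt : Int) : Decidable (Pre_f n l crt) := by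
  unfold Pre_f; infer_instance
def pvWitness_f : Int × List Int × Int := (4, ([1, 2, 3, 4], 0))

def Spec_f (n : Int) (l : List Int) (crt : Int) (out : Int) : Prop := out = f_alt n l crt
instance (n : Int) (l : List Int) (crt : Int) (out : Int) : Decidable (Spec_f n l crt out) := by unfold Spec_f; infer_instance

-- ===== CLAIM (what is proved, stated in full; the proofs are below) =====
def Claim_equal_f : Prop := ∀ (n : Int) (l : List Int) (crt : Int), Dom_f n l crt → Pre_f n l crt → Spec_f n l crt (f n l crt)

-- ===== LEMMAS AND PROOFS =====

-- Pure gain of merging the beads b down to 2, fuel = b.length; mirrors the candidate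
-- list shared by both ports.
def T : Nat → List Int → Int
  | 0, _ => 0
  | 1, _ => 0
  | 2, _ => 0
  | 3, b => PySem.List.pyGetD b 0 0 * PySem.List.pyGetD b 2 0
  | (m+4), b =>
      (PySem.List.max?
        ((PySem.List.pyRange 1 ((b.length : Int) - 1) 1).map
          (fun j => PySem.List.pyGetD b (j-1) 0 * PySem.List.pyGetD b (j+1) 0 +
            T (m+3) (PySem.List.slice b none (some j) ++ PySem.List.slice b (some (j+1)) none)))
        (fun y => y)).getD 0

def pvErase (b : List Int) (k : Nat) : List Int := b.take k ++ b.drop (k+1)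

def MemoOK (memo : PySem.Dict (List Int) Int) : Prop :=
  ∀ k v, PySem.Dict.get? memo k = some v → v = T k.length k

lemma max_zero_absorb (a t : Int) (h : 0 ≤ a) : max a t = max a (max 0 t) := by omega

lemma foldl_max_congr (g h : Int → Int) : ∀ (js : List Int) (a : Int), 0 ≤ a →
    (∀ j ∈ js, max 0 (g j) = max 0 (h j)) →
    js.foldl (fun mx j => max mx (g j)) a = js.foldl (fun mx j => max mx (h j)) a := by
  intro js
  induction js with
  | nil => intro a _ _; rfl
  | cons j t ih =>
    intro a ha hp
    simp only [List.foldl_cons]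
    rw [max_zero_absorb a (g j) ha, hp j (by simp), ← max_zero_absorb a (h j) ha]
    exact ih _ (by omega) (fun x hx => hp x (by simp [hx]))

lemma foldl_max_shift (x : Int → Int) (c : Int) : ∀ (t : List Int) (a b : Int),
    t.foldl (fun mx j => max mx (c + x j)) (max a (c + b)) = max a (c + (t.map x).foldl max b) := by
  intro t
  induction t with
  | nil => intro a b; rfl
  | cons j t ih =>
    intro a b
    simp only [List.foldl_cons, List.map_cons]
    rw [max_assoc, max_add_add_left c b (x j), ih]

lemma foldl_max_eq_max? (g x : Int → Int) (c : Int) (js : List Int) (hne : js ≠ [])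
    (h : ∀ j ∈ js, max 0 (g j) = max 0 (c + x j)) :
    js.foldl (fun mx j => max mx (g j)) 0 =
      max 0 (c + (PySem.List.max? (js.map x) (fun y => y)).getD 0) := by
  rw [foldl_max_congr g (fun j => c + x j) js 0 le_rfl h]
  cases js with
  | nil => exact absurd rfl hne
  | cons j t =>
    simp only [List.foldl_cons, List.map_cons, PySem.List.max?_id_cons, Option.getD_some]
    have h0 : (0 : Int) = max 0 0 := rfl
    calc List.foldl (fun mx j => max mx (c + x j)) (max 0 (c + x j)) t
        = max 0 (c + (t.map x).foldl max (x j)) := foldl_max_shift x c t 0 (x j)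

lemma slice_pair_eq (b : List Int) (j : Int) (hj : 0 ≤ j) :
    PySem.List.slice b none (some j) ++ PySem.List.slice b (some (j+1)) none = pvErase b j.toNat := by
  have h1 : (j + 1).toNat = j.toNat + 1 := by omega
  rw [PySem.List.slice_to b hj, PySem.List.slice_from b (by omega), h1, pvErase]

lemma pvErase_length (b : List Int) (k : Nat) (h : k + 2 ≤ b.length) :
    (pvErase b k).length = b.length - 1 := by
  simp [pvErase]; omega

lemma pvErase_take (l : List Int) (m k : Nat) (h1 : k + 2 ≤ m) (h2 : m ≤ l.length) :
    pvErase (l.take m) k = (pvErase l k).take (m - 1) := by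
  unfold pvErase
  rw [List.take_take, List.drop_take, List.take_append, List.take_take, List.length_take]
  have e1 : min k m = k := by omega
  have e2 : min (m - 1) k = k := by omega
  have e3 : m - 1 - min k l.length = m - (k + 1) := by omega
  rw [e1, e2, e3]

lemma pyGetD_take (l : List Int) (m : Nat) (i : Int) (d : Int)
    (h0 : 0 ≤ i) (h1 : i < (m : Int)) (h2 : m ≤ l.length) :
    PySem.List.pyGetD (l.take m) i d = PySem.List.pyGetD l i d := by
  have hlen : (l.take m).length = m := by simp [List.length_take]; omega
  rw [PySem.List.pyGetD_eq_getElem (l.take m) d h0 (by rw [hlen]; exact_mod_cast h1),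
      PySem.List.pyGetD_eq_getElem l d h0 (by push_cast; omega)]
  exact List.getElem_take

lemma fA_succ (m : Nat) (l : List Int) (crt : Int) :
    fA (m+4) l crt = (PySem.List.pyRange 1 ((m : Int) + 4 - 1) 1).foldl
      (fun mx i => max mx (fA (m+3)
         (PySem.List.slice l none (some i) ++ PySem.List.slice l (some (i+1)) none)
         (crt + PySem.List.pyGetD l (i-1) 0 * PySem.List.pyGetD l (i+1) 0))) 0 := by
  simp only [fA]

lemma fA_eq_T (k : Nat) : ∀ (l : List Int) (crt : Int), k + 3 ≤ l.length →
    fA (k+3) l crt = if k = 0 then crt + T 3 (l.take 3)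
                     else max 0 (crt + T (k+3) (l.take (k+3))) := by
  induction k with
  | zero =>
    intro l crt h
    rw [if_pos rfl]
    show fA 3 l crt = crt + T 3 (List.take 3 l)
    simp only [fA, T]
    rw [pyGetD_take l 3 0 0 (by norm_num) (by norm_num) (by omega),
        pyGetD_take l 3 2 0 (by norm_num) (by norm_num) (by omega)]
  | succ k ih =>
    intro l crt h
    rw [if_neg (Nat.succ_ne_zero k)]
    show fA (k+4) l crt = max 0 (crt + T (k+4) (l.take (k+4)))
    have hlen : k + 4 ≤ l.length := by omega
    have hbt : (l.take (k+4)).length = k+4 := by simp [List.length_take]; omega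
    rw [fA_succ k l crt]
    rw [foldl_max_eq_max?
      (fun i => fA (k+3)
         (PySem.List.slice l none (some i) ++ PySem.List.slice l (some (i+1)) none)
         (crt + PySem.List.pyGetD l (i-1) 0 * PySem.List.pyGetD l (i+1) 0))
      (fun j => PySem.List.pyGetD (l.take (k+4)) (j-1) 0 * PySem.List.pyGetD (l.take (k+4)) (j+1) 0 +
         T (k+3) (PySem.List.slice (l.take (k+4)) none (some j) ++
                  PySem.List.slice (l.take (k+4)) (some (j+1)) none))
      crt _ ?hne ?hpt]
    case hne =>
      rw [PySem.List.pyRange_one_cons (by push_cast; omega)]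
      exact List.cons_ne_nil _ _
    case hpt =>
      intro j hj
      beta_reduce
      obtain ⟨hj1, hj2⟩ := PySem.List.mem_pyRange_one.mp hj
      have h0j : (0 : Int) ≤ j := by omega
      have hjk : j.toNat ≤ k + 2 := by omega
      have hjk1 : 1 ≤ j.toNat := by omega
      rw [slice_pair_eq l j h0j, slice_pair_eq (l.take (k+4)) j h0j,
          pvErase_take l (k+4) j.toNat (by omega) (by omega)]
      have hPl : (pvErase l j.toNat).length = l.length - 1 :=
        pvErase_length l j.toNat (by omega)
      rw [ih (pvErase l j.toNat)
            (crt + PySem.List.pyGetD l (j-1) 0 * PySem.List.pyGetD l (j+1) 0) (by omega)]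
      rw [pyGetD_take l (k+4) (j-1) 0 (by omega) (by push_cast; omega) hlen,
          pyGetD_take l (k+4) (j+1) 0 (by omega) (by push_cast; omega) hlen]
      have hm1 : k + 4 - 1 = k + 3 := by omega
      rw [hm1]
      by_cases hk : k = 0
      · subst hk
        rw [if_pos rfl, add_assoc]
      · rw [if_neg hk, ← add_assoc]
        omega
    -- remaining: the max?-form equals T (k+4) (l.take (k+4))
    have hTb : T (k+4) (l.take (k+4)) =
        (PySem.List.max?
          ((PySem.List.pyRange 1 (((l.take (k+4)).length : Int) - 1) 1).map
            (fun j => PySem.List.pyGetD (l.take (k+4)) (j-1) 0 * PySem.List.pyGetD (l.take (k+4)) (j+1) 0 +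
              T (k+3) (PySem.List.slice (l.take (k+4)) none (some j) ++
                       PySem.List.slice (l.take (k+4)) (some (j+1)) none)))
          (fun y => y)).getD 0 := by
      simp only [T]
    rw [hTb, hbt]
    norm_num

def gstep (fu : Nat) (b : List Int) (acc : List Int × PySem.Dict (List Int) Int) (j : Int) :
    List Int × PySem.Dict (List Int) Int :=
  let b2 := PySem.List.slice b none (some j) ++ PySem.List.slice b (some (j+1)) none
  let p := gainB fu b2 acc.2
  (acc.1 ++ [PySem.List.pyGetD b (j-1) 0 * PySem.List.pyGetD b (j+1) 0 + p.1], p.2)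

lemma gainB_succ_else (fu : Nat) (b : List Int) (memo : PySem.Dict (List Int) Int)
    (hget : PySem.Dict.get? memo b = none) (h3 : ¬ b.length = 3) :
    gainB (fu+1) b memo =
      ((PySem.List.max? ((PySem.List.pyRange 1 ((b.length : Int) - 1) 1).foldl (gstep fu b) ([], memo)).1 (fun y => y)).getD 0,
       PySem.Dict.insert ((PySem.List.pyRange 1 ((b.length : Int) - 1) 1).foldl (gstep fu b) ([], memo)).2 b
         ((PySem.List.max? ((PySem.List.pyRange 1 ((b.length : Int) - 1) 1).foldl (gstep fu b) ([], memo)).1 (fun y => y)).getD 0)) := by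
  simp only [gainB, hget, if_neg h3]
  rfl

lemma gainB_fold (fu : Nat) (b : List Int)
    (ih : ∀ (b' : List Int) (memo' : PySem.Dict (List Int) Int), 3 ≤ b'.length →
      b'.length ≤ fu → MemoOK memo' →
      (gainB fu b' memo').1 = T b'.length b' ∧ MemoOK (gainB fu b' memo').2)
    (hlen : 4 ≤ b.length) (hfu : b.length ≤ fu + 1) :
    ∀ (js : List Int) (cs : List Int) (memo0 : PySem.Dict (List Int) Int),
      (∀ j ∈ js, 1 ≤ j ∧ j < (b.length : Int) - 1) → MemoOK memo0 →
      (js.foldl (gstep fu b) (cs, memo0)).1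
        = cs ++ js.map (fun j => PySem.List.pyGetD b (j-1) 0 * PySem.List.pyGetD b (j+1) 0 +
            T (b.length - 1) (PySem.List.slice b none (some j) ++ PySem.List.slice b (some (j+1)) none))
      ∧ MemoOK (js.foldl (gstep fu b) (cs, memo0)).2 := by
  intro js
  induction js with
  | nil => intro cs memo0 _ hm0; exact ⟨(List.append_nil cs).symm, hm0⟩
  | cons j t iht =>
    intro cs memo0 hjs hm0
    obtain ⟨hj1, hj2⟩ := hjs j (List.mem_cons_self)
    have h0j : (0 : Int) ≤ j := by omega
    have hsl : PySem.List.slice b none (some j) ++ PySem.List.slice b (some (j+1)) none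
        = pvErase b j.toNat := slice_pair_eq b j h0j
    have hPl : (pvErase b j.toNat).length = b.length - 1 :=
      pvErase_length b j.toNat (by omega)
    obtain ⟨hv, hm1⟩ := ih (pvErase b j.toNat) memo0 (by omega) (by omega) hm0
    have hstep : gstep fu b (cs, memo0) j =
        (cs ++ [PySem.List.pyGetD b (j-1) 0 * PySem.List.pyGetD b (j+1) 0 +
          T (b.length - 1) (PySem.List.slice b none (some j) ++ PySem.List.slice b (some (j+1)) none)],
         (gainB fu (pvErase b j.toNat) memo0).2) := by
      simp only [gstep]
      rw [hsl, hv, hPl]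
    simp only [List.foldl_cons, List.map_cons, hstep]
    obtain ⟨ha, hb⟩ := iht (cs ++ [PySem.List.pyGetD b (j-1) 0 * PySem.List.pyGetD b (j+1) 0 +
          T (b.length - 1) (PySem.List.slice b none (some j) ++ PySem.List.slice b (some (j+1)) none)])
        ((gainB fu (pvErase b j.toNat) memo0).2)
        (fun x hx => hjs x (List.mem_cons_of_mem j hx)) hm1
    refine ⟨?_, hb⟩
    rw [ha, List.append_assoc]
    rfl

lemma gainB_correct : ∀ (fu : Nat) (b : List Int) (memo : PySem.Dict (List Int) Int),
    3 ≤ b.length → b.length ≤ fu → MemoOK memo →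
    (gainB fu b memo).1 = T b.length b ∧ MemoOK (gainB fu b memo).2 := by
  intro fu
  induction fu with
  | zero => intro b memo h3 hle hm; omega
  | succ fu ih =>
    intro b memo h3 hle hm
    cases hget : PySem.Dict.get? memo b with
    | some v =>
      have hE : gainB (fu+1) b memo = (v, memo) := by simp [gainB, hget]
      rw [hE]
      exact ⟨hm b v hget, hm⟩
    | none =>
      by_cases h3' : b.length = 3
      · have hE : gainB (fu+1) b memo =
            (PySem.List.pyGetD b 0 0 * PySem.List.pyGetD b 2 0,
             PySem.Dict.insert memo b (PySem.List.pyGetD b 0 0 * PySem.List.pyGetD b 2 0)) := by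
          simp [gainB, hget, h3']
        have hT : T b.length b = PySem.List.pyGetD b 0 0 * PySem.List.pyGetD b 2 0 := by
          rw [h3']; simp only [T]
        rw [hE]
        refine ⟨hT.symm, ?_⟩
        intro k v hkv
        rw [PySem.Dict.get?_insert] at hkv
        by_cases hkb : k = b
        · rw [if_pos hkb] at hkv
          simp only [Option.some.injEq] at hkv
          rw [← hkv, hkb, hT]
        · rw [if_neg hkb] at hkv
          exact hm k v hkv
      · obtain ⟨m, hm4⟩ : ∃ m, b.length = m + 4 := ⟨b.length - 4, by omega⟩
        have hE := gainB_succ_else fu b memo hget h3'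
        obtain ⟨hr1, hr2⟩ := gainB_fold fu b ih (by omega) hle
          (PySem.List.pyRange 1 ((b.length : Int) - 1) 1) [] memo
          (fun j hj => PySem.List.mem_pyRange_one.mp hj) hm
        have hval :
            (PySem.List.max? ((PySem.List.pyRange 1 ((b.length : Int) - 1) 1).foldl (gstep fu b) ([], memo)).1 (fun y => y)).getD 0
              = T b.length b := by
          rw [hr1, List.nil_append]
          conv_rhs => rw [hm4]
          simp only [T]
          have hm1 : b.length - 1 = m + 3 := by omega
          rw [hm1]
        rw [hE]
        refine ⟨hval, ?_⟩
        intro k v hkv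
        rw [PySem.Dict.get?_insert] at hkv
        by_cases hkb : k = b
        · rw [if_pos hkb] at hkv
          simp only [Option.some.injEq] at hkv
          rw [← hkv, hkb, hval]
        · rw [if_neg hkb] at hkv
          exact hr2 k v hkv

-- ===== VERDICT (by name: the statement is the Claim_ definition above) =====
theorem f_spec : Claim_equal_f := by
  intro n l crt _ hpre
  show f n l crt = f_alt n l crt
  unfold f f_alt
  by_cases h2 : n = 2
  · subst h2; simp [fA]
  · by_cases h3 : n = 3
    · subst h3; simp [fA]
    · by_cases hlt : n < 2
      · have h01 : n.toNat = 0 ∨ n.toNat = 1 := by omega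
        rcases h01 with h | h <;> rw [h, if_neg h2, if_neg h3, if_pos hlt] <;> simp [fA]
      · have h4 : 4 ≤ n := by omega
        have hnl : n ≤ (l.length : Int) := by
          rcases hpre with h | ⟨_, h⟩
          · omega
          · exact h
        rw [if_neg h2, if_neg h3, if_neg hlt,
            PySem.List.slice_to l (by omega : (0:Int) ≤ n)]
        have hlen : (l.take n.toNat).length = n.toNat := by
          simp [List.length_take]; omega
        obtain ⟨hv, -⟩ := gainB_correct n.toNat (l.take n.toNat) PySem.Dict.empty
          (by rw [hlen]; omega) (by rw [hlen])
          (fun k v hkv => by rw [PySem.Dict.get?_empty] at hkv; cases hkv)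
        rw [hv, hlen]
        have hk : n.toNat = (n.toNat - 4) + 1 + 3 := by omega
        rw [hk, fA_eq_T (n.toNat - 4 + 1) l crt (by omega),
            if_neg (Nat.succ_ne_zero _)]
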